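-- pv_equiv track=rewrite | github.com/klvenky/music-library-cleanup | music_metadata_fixer.py | clean_album_name
-- ===== SOURCE A (Python) =====
-- def clean_album_name(album_name: str) -> str:
--     """
--     Clean album name by removing invalid characters and normalizing.
--
--     Args:
--         album_name: Original album name
--
--     Returns:
--         Cleaned album name
--     """
--     # If album_name is a tuple, take the first element
--     if isinstance(album_name, tuple):
--         album_name = album_name[0] if album_name else ''
--     if not album_name or album_name == 'Unknown Album':
--         return 'Unknown Album'
--
--     # Remove invalid filename characters
--     invalid_chars = '<>:"/\\|?*'
--     for char in invalid_chars:
--         album_name = album_name.replace(char, '')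
--
--     # Normalize spaces
--     album_name = ' '.join(album_name.split())
--
--     # Remove leading/trailing spaces
--     album_name = album_name.strip()
--
--     return album_name if album_name else 'Unknown Album'
-- ===== SOURCE B (Python) =====
-- def clean_album_name(album_name: str) -> str:
--     if isinstance(album_name, tuple):
--         album_name = album_name[0] if album_name else ''
--     if not album_name or album_name == 'Unknown Album':
--         return 'Unknown Album'
--     invalid = set('<>:"/\\|?*')
--     words = ''.join(c for c in album_name if c not in invalid).split()
--     return ' '.join(words) if words else 'Unknown Album'
-- ===== Notes on version B (the rewrite author's own statement) =====
-- stated objective: idiomatic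
-- what changed: Replaces the nine sequential full-string replace passes with a single character-filter pass over the string (membership in a set of invalid characters), and drops the redundant final strip by testing the split word list directly.
import Mathlib
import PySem

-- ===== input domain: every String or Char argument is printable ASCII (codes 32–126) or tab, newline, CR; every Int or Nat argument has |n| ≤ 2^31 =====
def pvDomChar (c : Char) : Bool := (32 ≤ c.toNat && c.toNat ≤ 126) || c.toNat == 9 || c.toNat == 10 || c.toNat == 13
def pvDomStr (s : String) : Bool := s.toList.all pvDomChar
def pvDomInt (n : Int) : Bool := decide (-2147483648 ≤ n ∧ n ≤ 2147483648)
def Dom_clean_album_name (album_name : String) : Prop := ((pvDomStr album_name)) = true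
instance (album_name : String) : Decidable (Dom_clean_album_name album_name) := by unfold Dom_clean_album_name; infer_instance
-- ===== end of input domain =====

-- B replaces A's nine sequential str.replace passes with one character-filter pass over
-- the string (set membership) and tests the split word list instead of re-stripping
-- the joined result (idiomatic).

-- ===== PORT A =====
-- the invalid filename characters '<>:"/\\|?*'
def pvInvalidChars : List Char := "<>:\"/\\|?*".toList

def clean_album_name (album_name : String) : String :=
  -- `if not album_name or album_name == 'Unknown Album'`
  if album_name = "" ∨ album_name = "Unknown Album" then "Unknown Album"
  else
    -- `for char in invalid_chars: album_name = album_name.replace(char, '')`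
    let s1 := pvInvalidChars.foldl (fun acc c => PySem.Chars.replace acc [c] []) album_name.toList
    -- `album_name = ' '.join(album_name.split())`
    let s2 := PySem.Chars.join [' '] (PySem.Chars.split₀ s1)
    -- `album_name = album_name.strip()`
    let s3 := PySem.Chars.strip s2
    if s3.isEmpty then "Unknown Album" else String.ofList s3

-- ===== PORT B =====
def clean_album_name_alt (album_name : String) : String :=
  if album_name = "" ∨ album_name = "Unknown Album" then "Unknown Album"
  else
    -- `invalid = set('<>:"/\\|?*')`
    let invalid := PySem.Set.ofList pvInvalidChars
    -- `words = ''.join(c for c in album_name if c not in invalid).split()`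
    let words := PySem.Chars.split₀ (album_name.toList.filter (fun c => !(invalid.contains c)))
    if words.isEmpty then "Unknown Album" else String.ofList (PySem.Chars.join [' '] words)

-- ===== PRECONDITION & SPEC =====
def Spec_clean_album_name (album_name : String) (out : String) : Prop := out = clean_album_name_alt album_name
instance (album_name : String) (out : String) : Decidable (Spec_clean_album_name album_name out) := by unfold Spec_clean_album_name; infer_instance

-- ===== CLAIM (what is proved, stated in full; the proofs are below) =====
def Claim_equal_clean_album_name : Prop := ∀ (album_name : String), Dom_clean_album_name album_name → Spec_clean_album_name album_name (clean_album_name album_name)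

-- ===== LEMMAS AND PROOFS =====
theorem pv_replace_go_del (c : Char) : ∀ (l : List Char) (fuel : Nat) (acc : List Char),
    l.length ≤ fuel →
    PySem.Chars.replace.go [c] [] fuel l acc = acc.reverse ++ l.filter (· ≠ c) := by
  intro l
  induction l with
  | nil =>
    intro fuel acc _
    cases fuel <;> simp [PySem.Chars.replace.go]
  | cons a t ih =>
    intro fuel acc hle
    cases fuel with
    | zero => simp at hle
    | succ f =>
      rw [PySem.Chars.replace.go]
      by_cases hac : a = c
      · subst hac
        rw [if_pos (by simp [List.isPrefixOf])]
        simp only [List.length_cons, List.length_nil, List.drop_succ_cons, List.drop_zero,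
          List.reverse_nil, List.nil_append]
        rw [ih f acc (by simpa using hle)]
        simp
      · rw [if_neg (by simp [List.isPrefixOf]; exact fun h => hac h.symm)]
        rw [ih f (a :: acc) (by simpa using hle)]
        simp [hac]

theorem pv_replace_del (cs : List Char) (c : Char) :
    PySem.Chars.replace cs [c] [] = cs.filter (· ≠ c) := by
  rw [PySem.Chars.replace]
  rw [if_neg (by simp)]
  simpa using pv_replace_go_del c cs cs.length [] le_rfl

theorem pv_foldl_del (inv : List Char) : ∀ (cs : List Char),
    inv.foldl (fun acc c => PySem.Chars.replace acc [c] []) cs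
      = cs.filter (fun x => !inv.contains x) := by
  induction inv with
  | nil => intro cs; simp
  | cons c inv ih =>
    intro cs
    rw [List.foldl_cons, ih, pv_replace_del, List.filter_filter]
    apply List.filter_congr
    intro x _
    by_cases hx : x = c <;> simp [hx]

def pvWord (w : List Char) : Prop := w ≠ [] ∧ ∀ ch ∈ w, PySem.Chars.isspace ch = false

theorem pv_split₀_go_sound : ∀ (l cur : List Char) (acc : List (List Char)),
    (∀ ch ∈ cur, PySem.Chars.isspace ch = false) →
    (∀ w ∈ acc, pvWord w) →
    ∀ w ∈ PySem.Chars.split₀.go l cur acc, pvWord w := by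
  intro l
  induction l with
  | nil =>
    intro cur acc hcur hacc w hw
    rw [PySem.Chars.split₀.go] at hw
    by_cases hc : cur.isEmpty
    · rw [if_pos hc] at hw
      exact hacc w (by simpa using hw)
    · rw [if_neg hc] at hw
      simp at hw
      rcases hw with h | h
      · exact hacc w h
      · subst h
        refine ⟨by simpa using hc, ?_⟩
        intro ch hch
        exact hcur ch (by simpa using hch)
  | cons a t ih =>
    intro cur acc hcur hacc w hw
    rw [PySem.Chars.split₀.go] at hw
    by_cases hs : PySem.Chars.isspace a
    · rw [if_pos hs] at hw
      by_cases hc : cur.isEmpty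
      · rw [if_pos hc] at hw
        exact ih [] acc (by simp) hacc w hw
      · rw [if_neg hc] at hw
        refine ih [] (cur.reverse :: acc) (by simp) ?_ w hw
        intro v hv
        rcases List.mem_cons.1 hv with h | h
        · subst h
          refine ⟨by simpa using hc, ?_⟩
          intro ch hch
          exact hcur ch (by simpa using hch)
        · exact hacc v h
    · rw [if_neg hs] at hw
      refine ih (a :: cur) acc ?_ hacc w hw
      intro ch hch
      rcases List.mem_cons.1 hch with h | h
      · subst h; simpa using hs
      · exact hcur ch h

theorem pv_split₀_sound (cs : List Char) : ∀ w ∈ PySem.Chars.split₀ cs, pvWord w := by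
  exact pv_split₀_go_sound cs [] [] (by simp) (by simp)

theorem pv_join_ne_nil (b : List Char) (rest : List (List Char)) (hb : b ≠ []) :
    PySem.Chars.join [' '] (b :: rest) ≠ [] := by
  cases rest with
  | nil => simpa [PySem.Chars.join_singleton] using hb
  | cons d rs => simp [PySem.Chars.join_cons_cons, hb]

theorem pv_lstrip_join (ws : List (List Char)) (h : ∀ w ∈ ws, pvWord w) :
    PySem.Chars.lstrip (PySem.Chars.join [' '] ws) = PySem.Chars.join [' '] ws := by
  cases ws with
  | nil => simp [PySem.Chars.join_nil, PySem.Chars.lstrip]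
  | cons w rest =>
    obtain ⟨hne, hns⟩ := h w (List.mem_cons_self ..)
    obtain ⟨a, w', rfl⟩ := List.exists_cons_of_ne_nil hne
    have ha : PySem.Chars.isspace a = false := hns a (List.mem_cons_self ..)
    cases rest with
    | nil =>
      simp [PySem.Chars.join_singleton, PySem.Chars.lstrip, ha]
    | cons d rs =>
      simp [PySem.Chars.join_cons_cons, PySem.Chars.lstrip, ha]

theorem pv_dropWhile_of_rev (y : List Char) (hy : List.dropWhile PySem.Chars.isspace y.reverse = y.reverse)
    (hy0 : y ≠ []) : ∃ b t, y.reverse = b :: t ∧ PySem.Chars.isspace b = false := by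
  obtain ⟨b, t, hbt⟩ := List.exists_cons_of_ne_nil (show y.reverse ≠ [] by simpa using hy0)
  refine ⟨b, t, hbt, ?_⟩
  by_contra hb
  rw [hbt, List.dropWhile_cons, if_pos (by simpa using hb)] at hy
  have := List.length_dropWhile_le PySem.Chars.isspace t
  rw [hy] at this
  simp at this

theorem pv_rstrip_append (x y : List Char) (hy : PySem.Chars.rstrip y = y) (hy0 : y ≠ []) :
    PySem.Chars.rstrip (x ++ y) = x ++ y := by
  have hy' : List.dropWhile PySem.Chars.isspace y.reverse = y.reverse := by
    have := congrArg List.reverse hy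
    rwa [PySem.Chars.rstrip, List.reverse_reverse] at this
  obtain ⟨b, t, hbt, hb⟩ := pv_dropWhile_of_rev y hy' hy0
  rw [PySem.Chars.rstrip, List.reverse_append, hbt, List.cons_append, List.dropWhile_cons,
    if_neg (by simp [hb]), ← List.cons_append, ← hbt, ← List.reverse_append, List.reverse_reverse]

theorem pv_rstrip_join (ws : List (List Char)) (h : ∀ w ∈ ws, pvWord w) :
    PySem.Chars.rstrip (PySem.Chars.join [' '] ws) = PySem.Chars.join [' '] ws := by
  induction ws with
  | nil => simp [PySem.Chars.join_nil, PySem.Chars.rstrip]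
  | cons w rest ih =>
    obtain ⟨hne, hns⟩ := h w (List.mem_cons_self ..)
    cases rest with
    | nil =>
      rw [PySem.Chars.join_singleton, PySem.Chars.rstrip]
      obtain ⟨b, t, hbt⟩ := List.exists_cons_of_ne_nil (show w.reverse ≠ [] by simpa using hne)
      have hb : PySem.Chars.isspace b = false :=
        hns b (by rw [← List.mem_reverse, hbt]; exact List.mem_cons_self ..)
      rw [hbt, List.dropWhile_cons, if_neg (by simp [hb]), ← hbt, List.reverse_reverse]
    | cons d rs =>
      rw [PySem.Chars.join_cons_cons]
      refine pv_rstrip_append (w ++ [' ']) _ (ih ?_) (pv_join_ne_nil d rs (h d (by simp)).1)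
      intro v hv; exact h v (List.mem_cons_of_mem _ hv)
theorem pv_set_ofList_invalid : PySem.Set.ofList pvInvalidChars = pvInvalidChars := by decide

theorem pv_main (s : String) : clean_album_name s = clean_album_name_alt s := by
  unfold clean_album_name clean_album_name_alt
  by_cases h : s = "" ∨ s = "Unknown Album"
  · rw [if_pos h, if_pos h]
  · rw [if_neg h, if_neg h]
    dsimp only
    rw [pv_set_ofList_invalid, pv_foldl_del]
    rw [show (fun c => !PySem.Set.contains pvInvalidChars c) = (fun c => !pvInvalidChars.contains c) from rfl]
    set f := s.toList.filter (fun c => !pvInvalidChars.contains c) with hf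
    have hsound := pv_split₀_sound f
    cases hws : PySem.Chars.split₀ f with
    | nil =>
      rw [PySem.Chars.join_nil, show PySem.Chars.strip ([] : List Char) = [] from rfl]
      rfl
    | cons w rest =>
      rw [hws] at hsound
      have hjoin : PySem.Chars.join [' '] (w :: rest) ≠ [] :=
        pv_join_ne_nil w rest (hsound w (by simp)).1
      rw [PySem.Chars.strip, pv_lstrip_join _ hsound, pv_rstrip_join _ hsound]
      rw [if_neg (by simpa using hjoin), if_neg (by simp)]

-- ===== VERDICT (by name: the statement is the Claim_ definition above) =====
theorem clean_album_name_spec : Claim_equal_clean_album_name :=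
  fun album_name _ => pv_main album_name
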